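-- pv_equiv track=rewrite | github.com/annaharbour/advent-of-code | 2024/python/day02/script.py | part_2
-- ===== SOURCE A (Python) =====
-- def dampener(report):
--   for i in range(len(report)):
--     temp = report[:]
--     del temp[i]
--     if validate(temp):
--       return True
--   return False
--
-- def validate(levels):
--     levels = list(map(int, levels))
--     # Check if levels are either strictly increasing or strictly decreasing
--     increasing = True
--     decreasing = True
--     difference = True
--     for i in range(1, len(levels)):
--         if levels[i] <= levels[i - 1]:
--             increasing = False
--         if levels[i] >= levels[i - 1]:
--             decreasing = False
--     for i in range(1, len(levels)):
--         diff = abs(levels[i] - levels[i - 1])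
--         if diff < 1 or diff > 3:
--             difference = False
--
--     return (increasing or decreasing) and difference
--
-- def part_2(reports):
--     safe_reports = 0
--     for report in reports:
--         if validate(report):
--             safe_reports += 1
--         elif dampener(report):
--             safe_reports += 1
--     return safe_reports
-- ===== SOURCE B (Python) =====
-- def part_2(reports):
--     def safe_dir(r, lo, hi):
--         # first adjacent pair violating lo <= diff <= hi, scanning once
--         i = next((k for k, (x, y) in enumerate(zip(r, r[1:]))
--                   if not (lo <= y - x <= hi)), None)
--         if i is None:
--             return True
--         def ok(t):
--             return all(lo <= y - x <= hi for x, y in zip(t, t[1:]))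
--         # only deleting level i or i+1 can repair the first violation
--         return ok(r[:i] + r[i + 1:]) or ok(r[:i + 1] + r[i + 2:])
--     return sum(1 for r in reports if safe_dir(r, 1, 3) or safe_dir(r, -3, -1))
-- ===== Notes on version B (the rewrite author's own statement) =====
-- stated objective: faster
-- what changed: A re-validates every one-element deletion of a report (O(n) deletions x O(n) validate); B makes one pass per direction to find the first violating adjacent pair and checks only the two deletions (that index or the next) that can repair it.
import Mathlib
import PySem

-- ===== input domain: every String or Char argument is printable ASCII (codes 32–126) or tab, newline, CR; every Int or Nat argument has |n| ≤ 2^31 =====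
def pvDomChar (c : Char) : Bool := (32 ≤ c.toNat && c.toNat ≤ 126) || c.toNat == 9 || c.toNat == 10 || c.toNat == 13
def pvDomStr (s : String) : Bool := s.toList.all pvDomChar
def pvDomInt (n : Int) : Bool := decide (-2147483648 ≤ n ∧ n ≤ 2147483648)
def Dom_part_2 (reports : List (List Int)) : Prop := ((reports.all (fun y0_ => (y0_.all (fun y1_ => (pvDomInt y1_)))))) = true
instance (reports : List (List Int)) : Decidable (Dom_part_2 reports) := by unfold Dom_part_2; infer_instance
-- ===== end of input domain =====

-- B replaces A's try-every-deletion O(n^2) scan per report with a single pass locating the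
-- first violating adjacent pair per direction and re-checking only the two deletions that can fix it.

-- ===== PORT A =====
-- first loop of validate: the two monotonicity flags, updated pair-by-pair
-- (the Python loop reads levels[i-1], levels[i] for i in range(1, len); ported as
--  structural recursion over the same adjacent pairs with the same flag state)
def pvLoop1 (inc dec : Bool) : List Int → Bool × Bool
  | a :: b :: rest =>
      pvLoop1 (if b ≤ a then false else inc) (if a ≤ b then false else dec) (b :: rest)
  | _ => (inc, dec)

-- second loop of validate: the difference flag
def pvLoop2 (difference : Bool) : List Int → Bool
  | a :: b :: rest =>
      pvLoop2 (if |b - a| < 1 || |b - a| > 3 then false else difference) (b :: rest)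
  | _ => difference

-- list(map(int, levels)) is the identity on a list of ints and is dropped
def validate (levels : List Int) : Bool :=
  let p := pvLoop1 true true levels
  (p.1 || p.2) && pvLoop2 true levels

-- del temp[i] on a copy, i ranging over the valid indices, with early return True
def dampener (report : List Int) : Bool :=
  (List.range report.length).any (fun i => validate (report.eraseIdx i))

def part_2 (reports : List (List Int)) : Int :=
  reports.foldl
    (fun safe_reports report =>
      if validate report then safe_reports + 1
      else if dampener report then safe_reports + 1
      else safe_reports) 0

-- ===== PORT B =====
def bOK (lo hi d : Int) : Bool := decide (lo ≤ d) && decide (d ≤ hi)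

-- ok(t): all adjacent differences lie in [lo, hi]
def allOK (lo hi : Int) : List Int → Bool
  | a :: b :: rest => bOK lo hi (b - a) && allOK lo hi (b :: rest)
  | _ => true

-- index of the first adjacent pair violating [lo, hi] (None if none)
def firstViol (lo hi : Int) : List Int → Option Nat
  | a :: b :: rest =>
      if bOK lo hi (b - a) then (firstViol lo hi (b :: rest)).map (· + 1) else some 0
  | _ => none

-- r[:i] + r[i+1:] is deletion of index i, ported as eraseIdx
def safeDir (lo hi : Int) (r : List Int) : Bool :=
  match firstViol lo hi r with
  | none => true
  | some i => allOK lo hi (r.eraseIdx i) || allOK lo hi (r.eraseIdx (i + 1))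

def part_2_alt (reports : List (List Int)) : Int :=
  reports.foldl
    (fun acc r => acc + (if safeDir 1 3 r || safeDir (-3) (-1) r then 1 else 0)) 0

-- ===== PRECONDITION & SPEC =====
def Spec_part_2 (reports : List (List Int)) (out : Int) : Prop := out = part_2_alt reports
instance (reports : List (List Int)) (out : Int) : Decidable (Spec_part_2 reports out) := by unfold Spec_part_2; infer_instance

-- ===== CLAIM (what is proved, stated in full; the proofs are below) =====
def Claim_equal_part_2 : Prop := ∀ (reports : List (List Int)), Dom_part_2 reports → Spec_part_2 reports (part_2 reports)

-- ===== LEMMAS AND PROOFS =====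

-- proof-side characterisations of A's flag loops
def allInc : List Int → Bool
  | a :: b :: rest => decide (a < b) && allInc (b :: rest)
  | _ => true

def allDec : List Int → Bool
  | a :: b :: rest => decide (b < a) && allDec (b :: rest)
  | _ => true

def allDiff : List Int → Bool
  | a :: b :: rest => (decide (1 ≤ |b - a|) && decide (|b - a| ≤ 3)) && allDiff (b :: rest)
  | _ => true

theorem pvLoop1_eq (inc dec : Bool) (l : List Int) :
    pvLoop1 inc dec l = (inc && allInc l, dec && allDec l) := by
  induction inc, dec, l using pvLoop1.induct with
  | case1 inc dec a b rest ih =>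
    simp only [pvLoop1, allInc, allDec, ih]
    refine Prod.ext ?_ ?_
    · by_cases h1 : b ≤ a
      · simp [h1, show ¬(a < b) by omega]
      · simp [h1, show a < b by omega]
    · by_cases h2 : a ≤ b
      · simp [h2, show ¬(b < a) by omega]
      · simp [h2, show b < a by omega]
  | case2 l inc dec h =>
    match l, h with
    | [], _ => simp [pvLoop1, allInc, allDec]
    | [a], _ => simp [pvLoop1, allInc, allDec]
    | a :: b :: r, h => exact (h a b r rfl).elim

theorem pvLoop2_eq (d : Bool) (l : List Int) : pvLoop2 d l = (d && allDiff l) := by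
  induction d, l using pvLoop2.induct with
  | case1 d a b rest ih =>
    simp only [pvLoop2, allDiff, ih]
    by_cases h1 : |b - a| < 1
    · simp [h1, show ¬(1 ≤ |b - a|) by omega]
    · by_cases h2 : 3 < |b - a|
      · simp [h1, h2, show ¬(|b - a| ≤ 3) by omega]
      · simp [h1, h2, show (1:Int) ≤ |b - a| by omega, show |b - a| ≤ 3 by omega]
  | case2 l d h =>
    match l, h with
    | [], _ => simp [pvLoop2, allDiff]
    | [a], _ => simp [pvLoop2, allDiff]
    | a :: b :: r, h => exact (h a b r rfl).elim

theorem allInc_allDiff (l : List Int) : (allInc l && allDiff l) = allOK 1 3 l := by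
  induction l using allOK.induct with
  | case1 a b rest ih =>
    simp only [allInc, allDiff, allOK, ← ih, bOK]
    have h : (decide (a < b) && (decide (1 ≤ |b - a|) && decide (|b - a| ≤ 3)))
        = (decide ((1:Int) ≤ b - a) && decide (b - a ≤ 3)) := by
      rw [Bool.eq_iff_iff]
      simp only [Bool.and_eq_true, decide_eq_true_eq]
      rcases abs_cases (b - a) with ⟨he, hs⟩ | ⟨he, hs⟩ <;> rw [he] <;> omega
    rw [show ∀ (x y i d : Bool), ((x && i) && ((y && d) : Bool)) = ((x && y) && (i && d)) by
      intros x y i d; cases x <;> cases y <;> cases i <;> cases d <;> rfl, h]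
  | case2 l h =>
    match l, h with
    | [], _ => rfl
    | [a], _ => rfl
    | a :: b :: r, h => exact (h a b r rfl).elim

theorem allDec_allDiff (l : List Int) : (allDec l && allDiff l) = allOK (-3) (-1) l := by
  induction l using allOK.induct with
  | case1 a b rest ih =>
    simp only [allDec, allDiff, allOK, ← ih, bOK]
    have h : (decide (b < a) && (decide (1 ≤ |b - a|) && decide (|b - a| ≤ 3)))
        = (decide ((-3:Int) ≤ b - a) && decide (b - a ≤ -1)) := by
      rw [Bool.eq_iff_iff]
      simp only [Bool.and_eq_true, decide_eq_true_eq]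
      rcases abs_cases (b - a) with ⟨he, hs⟩ | ⟨he, hs⟩ <;> rw [he] <;> omega
    rw [show ∀ (x y i d : Bool), ((x && i) && ((y && d) : Bool)) = ((x && y) && (i && d)) by
      intros x y i d; cases x <;> cases y <;> cases i <;> cases d <;> rfl, h]
  | case2 l h =>
    match l, h with
    | [], _ => rfl
    | [a], _ => rfl
    | a :: b :: r, h => exact (h a b r rfl).elim

theorem validate_eq (l : List Int) :
    validate l = (allOK 1 3 l || allOK (-3) (-1) l) := by
  simp only [validate, pvLoop1_eq, pvLoop2_eq, ← allInc_allDiff, ← allDec_allDiff]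
  cases allInc l <;> cases allDec l <;> cases allDiff l <;> rfl

theorem allOK_iff (lo hi : Int) (t : List Int) :
    allOK lo hi t = true ↔ ∀ k, (h : k + 1 < t.length) → bOK lo hi (t[k+1] - t[k]) = true := by
  induction t using allOK.induct with
  | case1 a b rest ih =>
    simp only [allOK, Bool.and_eq_true, ih]
    constructor
    · rintro ⟨h0, hrest⟩ k hk
      match k with
      | 0 => simpa using h0
      | k + 1 =>
        have := hrest k (by simpa using Nat.lt_of_succ_lt_succ hk)
        simpa using this
    · intro h
      refine ⟨by simpa using h 0 (by simp), fun k hk => ?_⟩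
      have := h (k + 1) (by simpa using Nat.succ_lt_succ hk)
      simpa using this
  | case2 l h =>
    match l, h with
    | [], _ => simp [allOK]
    | [a], _ => simp [allOK]
    | a :: b :: r, h => exact (h a b r rfl).elim

theorem firstViol_none (lo hi : Int) (t : List Int) :
    firstViol lo hi t = none → allOK lo hi t = true := by
  induction t using firstViol.induct lo hi with
  | case1 a b rest hb ih =>
    intro h
    simp only [firstViol, hb, if_true, Option.map_eq_none_iff] at h
    simp [allOK, hb, ih h]
  | case2 a b rest hb =>
    intro h
    simp [firstViol, hb] at h
  | case3 l h2 =>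
    intro _
    match l, h2 with
    | [], _ => rfl
    | [a], _ => rfl
    | a :: b :: r, h2 => exact (h2 a b r rfl).elim

theorem firstViol_some (lo hi : Int) (t : List Int) : ∀ i,
    firstViol lo hi t = some i →
    ∃ (h1 : i + 1 < t.length), bOK lo hi (t[i+1] - t[i]) = false := by
  induction t using firstViol.induct lo hi with
  | case1 a b rest hb ih =>
    intro i h
    simp only [firstViol, hb, if_true, Option.map_eq_some_iff] at h
    obtain ⟨j, hj, rfl⟩ := h
    obtain ⟨h1, h2⟩ := ih j hj
    exact ⟨by simpa using Nat.succ_lt_succ h1, by simpa using h2⟩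
  | case2 a b rest hb =>
    intro i h
    simp only [firstViol] at h
    rw [if_neg hb] at h
    injection h with h
    subst h
    refine ⟨by simp, ?_⟩
    simpa using hb
  | case3 l h2 =>
    intro i h
    match l, h2 with
    | [], _ => simp [firstViol] at h
    | [a], _ => simp [firstViol] at h
    | a :: b :: r, h2 => exact (h2 a b r rfl).elim

-- only deleting index i or i+1 can remove the violation at the first bad pair
theorem erase_other_not_ok (lo hi : Int) (r : List Int) (i j : Nat)
    (hi1 : i + 1 < r.length) (hbad : bOK lo hi (r[i+1] - r[i]) = false)
    (hj : j < r.length) (hji : j ≠ i) (hji1 : j ≠ i + 1) :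
    allOK lo hi (r.eraseIdx j) = false := by
  have hlen : (r.eraseIdx j).length = r.length - 1 := by
    simp [List.length_eraseIdx, hj]
  by_contra hok
  have hok' : allOK lo hi (r.eraseIdx j) = true := by
    cases h : allOK lo hi (r.eraseIdx j) <;> simp_all
  rw [allOK_iff] at hok'
  rcases Nat.lt_or_ge j i with hlt | hge
  · -- j < i : pair (r[i], r[i+1]) sits at positions (i-1, i) of the erased list
    have hi1' : i - 1 + 1 < (r.eraseIdx j).length := by omega
    have e1 : (r.eraseIdx j)[i - 1 + 1] = r[i + 1] := by
      rw [List.getElem_eraseIdx_of_ge _ (by omega)]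
      congr 1; omega
    have e2 : (r.eraseIdx j)[i - 1] = r[i] := by
      rcases Nat.lt_or_ge (i - 1) j with h' | h'
      · omega
      · rw [List.getElem_eraseIdx_of_ge _ h']; congr 1; omega
    have := hok' (i - 1) hi1'
    rw [e1, e2] at this
    rw [this] at hbad; simp at hbad
  · -- j > i + 1 : pair stays at positions (i, i+1)
    have hgt : i + 1 < j := by omega
    have hi1' : i + 1 < (r.eraseIdx j).length := by omega
    have e1 : (r.eraseIdx j)[i + 1] = r[i + 1] := List.getElem_eraseIdx_of_lt _ hgt
    have e2 : (r.eraseIdx j)[i]'(by omega) = r[i] := List.getElem_eraseIdx_of_lt _ (by omega)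
    have := hok' i hi1'
    rw [e1, e2] at this
    rw [this] at hbad; simp at hbad

theorem safeDir_eq (lo hi : Int) (r : List Int) :
    safeDir lo hi r
      = (allOK lo hi r || (List.range r.length).any (fun j => allOK lo hi (r.eraseIdx j))) := by
  unfold safeDir
  cases hfv : firstViol lo hi r with
  | none => simp [firstViol_none lo hi r hfv]
  | some i =>
    obtain ⟨h1, hbad⟩ := firstViol_some lo hi r i hfv
    have hnotok : allOK lo hi r = false := by
      by_contra h
      have h' : allOK lo hi r = true := by cases h2 : allOK lo hi r <;> simp_all
      rw [allOK_iff] at h'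
      have := h' i h1
      rw [this] at hbad; simp at hbad
    rw [hnotok, Bool.false_or, Bool.eq_iff_iff]
    simp only [Bool.or_eq_true, List.any_eq_true, List.mem_range]
    constructor
    · rintro (h | h)
      · exact ⟨i, by omega, h⟩
      · exact ⟨i + 1, by omega, h⟩
    · rintro ⟨j, hj, hok⟩
      by_cases hji : j = i
      · subst hji; exact Or.inl hok
      · by_cases hji1 : j = i + 1
        · subst hji1; exact Or.inr hok
        · rw [erase_other_not_ok lo hi r i j h1 hbad hj hji hji1] at hok
          exact absurd hok (by simp)

theorem report_eq (r : List Int) :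
    (validate r || dampener r) = (safeDir 1 3 r || safeDir (-3) (-1) r) := by
  rw [safeDir_eq, safeDir_eq, Bool.eq_iff_iff]
  simp only [dampener, validate_eq, Bool.or_eq_true, List.any_eq_true, List.mem_range]
  constructor
  · rintro ((h | h) | ⟨j, hj, (h | h)⟩)
    · exact Or.inl (Or.inl h)
    · exact Or.inr (Or.inl h)
    · exact Or.inl (Or.inr ⟨j, hj, h⟩)
    · exact Or.inr (Or.inr ⟨j, hj, h⟩)
  · rintro ((h | ⟨j, hj, h⟩) | (h | ⟨j, hj, h⟩))
    · exact Or.inl (Or.inl h)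
    · exact Or.inr ⟨j, hj, Or.inl h⟩
    · exact Or.inl (Or.inr h)
    · exact Or.inr ⟨j, hj, Or.inr h⟩

theorem foldl_eq (reports : List (List Int)) : ∀ acc : Int,
    reports.foldl
      (fun safe_reports report =>
        if validate report then safe_reports + 1
        else if dampener report then safe_reports + 1
        else safe_reports) acc
    = reports.foldl
        (fun acc r => acc + (if safeDir 1 3 r || safeDir (-3) (-1) r then 1 else 0)) acc := by
  induction reports with
  | nil => intro acc; rfl
  | cons r rest ih =>
    intro acc
    simp only [List.foldl_cons]
    have h := report_eq r
    by_cases hv : validate r = true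
    · have : (safeDir 1 3 r || safeDir (-3) (-1) r) = true := by rw [← h]; simp [hv]
      rw [ih]; simp [hv, this]
    · by_cases hd : dampener r = true
      · have : (safeDir 1 3 r || safeDir (-3) (-1) r) = true := by rw [← h]; simp [hd]
        rw [ih]; simp [hv, hd, this]
      · have : (safeDir 1 3 r || safeDir (-3) (-1) r) = false := by
          rw [← h]; simp [Bool.eq_false_iff.mp (by simpa using hv), Bool.eq_false_iff.mp (by simpa using hd)]
        rw [ih]; simp [hv, hd, this]

-- ===== VERDICT (by name: the statement is the Claim_ definition above) =====
theorem part_2_spec : Claim_equal_part_2 := by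
  intro reports _
  show part_2 reports = part_2_alt reports
  unfold part_2 part_2_alt
  exact foldl_eq reports 0
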